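-- pv_equiv track=rewrite | github.com/songqihao77-code/RareDisease-traindata | src/evaluation/multilabel_metrics.py | rank_for_label_set
-- ===== SOURCE A (Python) =====
-- from collections.abc import Iterable
--
-- MISSING_RANK = 10**9
--
-- def rank_for_label_set(
--     ranked_indices: Iterable[int],
--     labels: Iterable[str],
--     disease_to_idx: dict[str, int],
-- ) -> int:
--     target_indices = {int(disease_to_idx[label]) for label in labels if label in disease_to_idx}
--     if not target_indices:
--         return MISSING_RANK
--     for rank, idx in enumerate(ranked_indices, start=1):
--         if int(idx) in target_indices:
--             return int(rank)
--     return MISSING_RANK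
-- ===== SOURCE B (Python) =====
-- from collections.abc import Iterable
--
-- MISSING_RANK = 10**9
--
-- def rank_for_label_set(
--     ranked_indices: Iterable[int],
--     labels: Iterable[str],
--     disease_to_idx: dict[str, int],
-- ) -> int:
--     # Precompute the full ranking index: each value -> its earliest 1-based rank.
--     rank_of: dict[int, int] = {}
--     rank = 1
--     for idx in ranked_indices:
--         rank_of.setdefault(int(idx), rank)
--         rank += 1
--     target_indices = {int(disease_to_idx[label]) for label in labels if label in disease_to_idx}
--     return min((rank_of[i] for i in target_indices if i in rank_of), default=MISSING_RANK)
-- ===== Notes on version B (the rewrite author's own statement) =====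
-- stated objective: alternative
-- what changed: Instead of scanning the ranking with an early-exit membership test against the target set, B precomputes a dict mapping every ranked index to its earliest 1-based rank and returns the minimum rank over the target indices (min with default MISSING_RANK), reversing the traversal direction.
import Mathlib
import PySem

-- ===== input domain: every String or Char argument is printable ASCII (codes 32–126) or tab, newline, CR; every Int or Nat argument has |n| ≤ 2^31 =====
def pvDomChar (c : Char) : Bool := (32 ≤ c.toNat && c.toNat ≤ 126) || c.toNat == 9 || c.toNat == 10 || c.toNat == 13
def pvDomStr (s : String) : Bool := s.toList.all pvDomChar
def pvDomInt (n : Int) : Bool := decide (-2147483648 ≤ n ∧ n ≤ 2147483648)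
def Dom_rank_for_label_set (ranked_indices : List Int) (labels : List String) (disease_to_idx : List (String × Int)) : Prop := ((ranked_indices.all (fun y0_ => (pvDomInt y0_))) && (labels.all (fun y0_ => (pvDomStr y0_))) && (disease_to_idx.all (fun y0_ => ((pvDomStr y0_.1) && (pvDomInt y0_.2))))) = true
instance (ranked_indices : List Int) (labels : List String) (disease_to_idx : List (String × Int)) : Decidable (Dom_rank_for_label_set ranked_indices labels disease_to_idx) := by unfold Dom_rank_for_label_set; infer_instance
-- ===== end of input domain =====

-- B replaces A's early-exit scan of the ranking (membership test against the target set) by a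
-- precomputed value→earliest-rank dict followed by a min over the target indices (alternative decomposition).

-- ===== PORT A =====
-- set comprehension {int(disease_to_idx[label]) for label in labels if label in disease_to_idx}
-- (identical line in A and in Source B, so shared by both ports; int() on an int is the identity)
def pvTargets (labels : List String) (disease_to_idx : List (String × Int)) : PySem.Set Int :=
  PySem.Set.ofList (labels.filterMap (fun lab => PySem.Dict.get? (PySem.Dict.mk disease_to_idx) lab))

-- for rank, idx in enumerate(ranked_indices, start=1): if int(idx) in target_indices: return int(rank)
def pvScanA (xs : List Int) (tgts : PySem.Set Int) (rank : Int) : Int :=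
  match xs with
  | [] => 1000000000
  | i :: rest => if PySem.Set.contains tgts i then rank else pvScanA rest tgts (rank + 1)

def rank_for_label_set (ranked_indices : List Int) (labels : List String) (disease_to_idx : List (String × Int)) : Int :=
  let target_indices := pvTargets labels disease_to_idx
  if target_indices = [] then 1000000000
  else pvScanA ranked_indices target_indices 1

-- ===== PORT B =====
-- for idx in ranked_indices: rank_of.setdefault(int(idx), rank); rank += 1
def pvRankOfAux (xs : List Int) (d : PySem.Dict Int Int) (rank : Int) : PySem.Dict Int Int :=
  match xs with
  | [] => d
  | i :: rest => pvRankOfAux rest (PySem.Dict.setdefault d i rank) (rank + 1)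

def rank_for_label_set_alt (ranked_indices : List Int) (labels : List String) (disease_to_idx : List (String × Int)) : Int :=
  let rank_of := pvRankOfAux ranked_indices PySem.Dict.empty 1
  let target_indices := pvTargets labels disease_to_idx
  -- min((rank_of[i] for i in target_indices if i in rank_of), default=MISSING_RANK)
  (PySem.List.min? (target_indices.filterMap (fun i => PySem.Dict.get? rank_of i)) (fun v => v)).getD 1000000000

-- ===== PRECONDITION & SPEC =====
def Spec_rank_for_label_set (ranked_indices : List Int) (labels : List String) (disease_to_idx : List (String × Int)) (out : Int) : Prop := out = rank_for_label_set_alt ranked_indices labels disease_to_idx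
instance (ranked_indices : List Int) (labels : List String) (disease_to_idx : List (String × Int)) (out : Int) : Decidable (Spec_rank_for_label_set ranked_indices labels disease_to_idx out) := by unfold Spec_rank_for_label_set; infer_instance

-- ===== CLAIM (what is proved, stated in full; the proofs are below) =====
def Claim_equal_rank_for_label_set : Prop := ∀ (ranked_indices : List Int) (labels : List String) (disease_to_idx : List (String × Int)), Dom_rank_for_label_set ranked_indices labels disease_to_idx → Spec_rank_for_label_set ranked_indices labels disease_to_idx (rank_for_label_set ranked_indices labels disease_to_idx)

-- ===== LEMMAS AND PROOFS =====

-- first 1-based position of value i in xs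
def pvFR (xs : List Int) (i : Int) : Option Int :=
  match xs with
  | [] => none
  | x :: rest => if x == i then some 1 else (pvFR rest i).map (· + 1)

-- first 1-based position of a value of tgts in xs
def pvFH (xs : List Int) (tgts : List Int) : Option Int :=
  match xs with
  | [] => none
  | x :: rest => if tgts.contains x then some 1 else (pvFH rest tgts).map (· + 1)

theorem pvScanA_eq (xs : List Int) (tgts : PySem.Set Int) (r : Int) :
    pvScanA xs tgts r = match pvFH xs tgts with
      | some v => v + (r - 1)
      | none => 1000000000 := by
  induction xs generalizing r with
  | nil => simp [pvScanA, pvFH]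
  | cons x rest ih =>
    by_cases h : x ∈ (tgts : List Int)
    · simp only [pvScanA, pvFH]
      simp [h]
    · simp only [pvScanA, pvFH]
      rw [ih]
      cases pvFH rest tgts <;> simp [h]

theorem pvRankOfAux_get? (xs : List Int) (d : PySem.Dict Int Int) (r i : Int) :
    PySem.Dict.get? (pvRankOfAux xs d r) i =
      match PySem.Dict.get? d i with
      | some v => some v
      | none => (pvFR xs i).map (· + (r - 1)) := by
  induction xs generalizing d r with
  | nil =>
    cases h : PySem.Dict.get? d i <;> simp [pvRankOfAux, h, pvFR]
  | cons x rest ih =>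
    simp only [pvRankOfAux, ih, pvFR]
    by_cases hx : i = x
    · subst hx
      rw [PySem.Dict.get?_setdefault_self]
      cases h : PySem.Dict.get? d i with
      | none => simp
      | some v => simp
    · rw [PySem.Dict.get?_setdefault_of_ne d r hx]
      cases h : PySem.Dict.get? d i with
      | some v => simp
      | none =>
        have hbx : (x == i) = false := by simp; exact fun e => hx e.symm
        simp only [hbx]
        cases pvFR rest i with
        | none => simp
        | some v => simp

theorem pvFR_pos (xs : List Int) (i v : Int) (h : pvFR xs i = some v) : 1 ≤ v := by
  induction xs generalizing v with
  | nil => simp [pvFR] at h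
  | cons x rest ih =>
    simp only [pvFR] at h
    by_cases hx : (x == i) = true
    · simp [hx] at h; omega
    · simp only [hx] at h
      cases hr : pvFR rest i with
      | none => simp [hr] at h
      | some w => rw [hr] at h; simp at h; have := ih w hr; omega

theorem foldl_min_map_add_one (t : List Int) (x : Int) :
    (t.map (· + 1)).foldl min (x + 1) = t.foldl min x + 1 := by
  induction t generalizing x with
  | nil => simp
  | cons y t' ih =>
    simp only [List.map_cons, List.foldl_cons]
    rw [show min (x + 1) (y + 1) = min x y + 1 by omega, ih]

theorem min?_id_map_add_one (l : List Int) :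
    PySem.List.min? (l.map (· + 1)) (fun v => v) = (PySem.List.min? l (fun v => v)).map (· + 1) := by
  cases l with
  | nil => simp [PySem.List.min?]
  | cons x t =>
    simp only [List.map_cons, PySem.List.min?_id_cons, Option.map_some]
    rw [foldl_min_map_add_one]

theorem min?_id_eq_one (l : List Int) (h1 : (1 : Int) ∈ l) (hge : ∀ v ∈ l, (1 : Int) ≤ v) :
    PySem.List.min? l (fun v => v) = some 1 := by
  cases hm : PySem.List.min? l (fun v => v) with
  | none =>
    rw [PySem.List.min?_eq_none_iff] at hm
    subst hm; simp at h1
  | some m =>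
    have hmem := PySem.List.min?_mem hm
    have h1le : (1 : Int) ≤ m := hge m hmem
    have hle1 : m ≤ 1 := PySem.List.min?_isMin hm 1 h1
    simp only [Option.some.injEq]
    omega

theorem pvFH_min (xs : List Int) (tgts : List Int) :
    PySem.List.min? (tgts.filterMap (fun i => pvFR xs i)) (fun v => v) = pvFH xs tgts := by
  induction xs with
  | nil =>
    have he : tgts.filterMap (fun i => pvFR [] i) = [] := by
      simp [pvFR]
    simp [he, pvFH, PySem.List.min?]
  | cons x rest ih =>
    by_cases h : x ∈ tgts
    · have h1 : (1 : Int) ∈ tgts.filterMap (fun i => pvFR (x :: rest) i) := by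
        refine List.mem_filterMap.2 ⟨x, h, ?_⟩
        simp [pvFR]
      rw [min?_id_eq_one _ h1 (fun v hv => by
        rcases List.mem_filterMap.1 hv with ⟨i, _, hfi⟩
        exact pvFR_pos _ _ _ hfi)]
      simp [pvFH, h]
    · have hcongr : tgts.filterMap (fun i => pvFR (x :: rest) i)
          = tgts.filterMap (fun i => (pvFR rest i).map (· + 1)) := by
        apply List.filterMap_congr
        intro i hi
        have hne : (x == i) = false := by
          simp
          rintro rfl
          exact h hi
        simp [pvFR, hne]
      rw [hcongr, ← List.map_filterMap, min?_id_map_add_one, ih]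
      simp [pvFH, h]

theorem pvFH_nil_tgts (xs : List Int) : pvFH xs [] = none := by
  induction xs with
  | nil => rfl
  | cons x rest ih => simp [pvFH, ih]

theorem pvMain_eq (ris : List Int) (tgts : PySem.Set Int) :
    (if tgts = ([] : List Int) then (1000000000 : Int) else pvScanA ris tgts 1)
      = (PySem.List.min? ((tgts : List Int).filterMap
            (fun i => PySem.Dict.get? (pvRankOfAux ris PySem.Dict.empty 1) i)) (fun v => v)).getD 1000000000 := by
  have hb : (tgts : List Int).filterMap (fun i => PySem.Dict.get? (pvRankOfAux ris PySem.Dict.empty 1) i)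
      = (tgts : List Int).filterMap (fun i => pvFR ris i) := by
    apply List.filterMap_congr
    intro i _
    rw [pvRankOfAux_get?]
    simp [PySem.Dict.get?_empty]
  rw [hb, pvFH_min]
  by_cases he : (tgts : List Int) = []
  · simp [he, pvFH_nil_tgts]
  · simp only [he, if_false]
    rw [pvScanA_eq]
    cases pvFH ris tgts <;> simp

-- ===== VERDICT (by name: the statement is the Claim_ definition above) =====
theorem rank_for_label_set_spec : Claim_equal_rank_for_label_set := by
  intro ris labels d _
  unfold Spec_rank_for_label_set rank_for_label_set rank_for_label_set_alt
  exact pvMain_eq ris (pvTargets labels d)
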